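-- pv_equiv track=rewrite | github.com/leobikotech/claw-agent | claw_agent/memory/session_prompts.py | truncate_session_notes_for_compact
-- ===== SOURCE A (Python) =====
-- MAX_SECTION_LENGTH = 2000       # Max tokens per section
--
-- _CHARS_PER_TOKEN = 4
--
-- def truncate_session_notes_for_compact(content: str) -> tuple[str, bool]:
--     """Truncate oversized sections for compact injection.
--     Maps to: truncateSessionMemoryForCompact() in prompts.ts
--
--     Returns:
--         (truncated_content, was_truncated)
--     """
--     lines = content.split("\n")
--     max_chars_per_section = MAX_SECTION_LENGTH * _CHARS_PER_TOKEN
--     output_lines: list[str] = []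
--     current_section_lines: list[str] = []
--     current_section_header = ""
--     was_truncated = False
--
--     for line in lines:
--         if line.startswith("# "):
--             # Flush previous section
--             flushed, trunc = _flush_section(
--                 current_section_header, current_section_lines, max_chars_per_section
--             )
--             output_lines.extend(flushed)
--             was_truncated = was_truncated or trunc
--             current_section_header = line
--             current_section_lines = []
--         else:
--             current_section_lines.append(line)
--
--     # Flush the last section
--     flushed, trunc = _flush_section(
--         current_section_header, current_section_lines, max_chars_per_section
--     )
--     output_lines.extend(flushed)
--     was_truncated = was_truncated or trunc
--
--     return "\n".join(output_lines), was_truncated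
--
-- def _flush_section(
--     header: str,
--     section_lines: list[str],
--     max_chars: int,
-- ) -> tuple[list[str], bool]:
--     """Flush a section, truncating if over budget.
--     Maps to: flushSessionSection() in prompts.ts
--     """
--     if not header:
--         return section_lines, False
--
--     section_content = "\n".join(section_lines)
--     if len(section_content) <= max_chars:
--         return [header] + section_lines, False
--
--     # Truncate at line boundary
--     char_count = 0
--     kept: list[str] = [header]
--     for line in section_lines:
--         if char_count + len(line) + 1 > max_chars:
--             break
--         kept.append(line)
--         char_count += len(line) + 1
--
--     kept.append("\n[... section truncated for length ...]")
--     return kept, True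
-- ===== SOURCE B (Python) =====
-- MAX_SECTION_LENGTH = 2000       # Max tokens per section
--
-- _CHARS_PER_TOKEN = 4
--
-- _SENTINEL = "\n[... section truncated for length ...]"
--
--
-- def truncate_session_notes_for_compact(content: str) -> tuple[str, bool]:
--     """Index-and-slice formulation: locate header positions, slice each section
--     out of the line array, and binary-search the prefix-sum array of line sizes
--     for the truncation point of an oversized section.
--
--     Returns:
--         (truncated_content, was_truncated)
--     """
--     max_chars = MAX_SECTION_LENGTH * _CHARS_PER_TOKEN
--     lines = content.split("\n")
--     cuts = [i for i, ln in enumerate(lines) if ln.startswith("# ")] + [len(lines)]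
--     out = lines[: cuts[0]]            # headerless preamble, emitted verbatim
--     truncated_at = []
--     for s, e in zip(cuts, cuts[1:]):
--         body = lines[s + 1 : e]
--         acc = 0
--         prefs = [acc := acc + len(ln) + 1 for ln in body]   # prefix sums of len+1
--         if (prefs[-1] if prefs else 0) - 1 <= max_chars:    # == len("\n".join(body))
--             out += lines[s:e]
--         else:
--             # prefs is strictly increasing: binary-search the cut point
--             lo, hi = 0, len(prefs)
--             while lo < hi:
--                 mid = (lo + hi) // 2
--                 if prefs[mid] <= max_chars:
--                     lo = mid + 1
--                 else:
--                     hi = mid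
--             out += [lines[s]] + body[:lo] + [_SENTINEL]
--             truncated_at.append(s)
--     return "\n".join(out), bool(truncated_at)
-- ===== Notes on version B (the rewrite author's own statement) =====
-- stated objective: alternative
-- what changed: Replaces A's streaming flush-at-each-header accumulation with an index-and-slice formulation: header positions are computed up front from an enumerate pass, each section is sliced out of the line array by index pairs, the over-budget test uses a prefix-sum array of line sizes, and the truncation point is found by binary search over that strictly increasing array instead of A's accumulate-until-overflow break loop.
import Mathlib
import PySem

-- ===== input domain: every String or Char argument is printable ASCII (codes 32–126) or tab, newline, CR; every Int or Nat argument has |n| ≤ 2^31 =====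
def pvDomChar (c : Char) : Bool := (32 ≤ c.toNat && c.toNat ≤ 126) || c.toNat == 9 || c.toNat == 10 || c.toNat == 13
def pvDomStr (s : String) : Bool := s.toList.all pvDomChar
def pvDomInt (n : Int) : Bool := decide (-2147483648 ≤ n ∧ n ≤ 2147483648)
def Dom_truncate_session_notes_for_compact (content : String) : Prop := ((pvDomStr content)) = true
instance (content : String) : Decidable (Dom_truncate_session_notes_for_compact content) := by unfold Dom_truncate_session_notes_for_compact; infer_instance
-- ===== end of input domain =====

-- B replaces A's streaming flush-at-each-header loop by an index-and-slice formulation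
-- (header positions up front, sections sliced out by index pairs, truncation point by
-- binary search over a prefix-sum array); same values everywhere, objective: alternative.

-- ===== PORT A =====
-- the truncation loop of _flush_section (breaks at the first overflowing line)
def pvKeptLoop (maxChars : Int) : List String → Int → List String → List String
  | [], _, kept => kept
  | line :: rest, charCount, kept =>
    if charCount + PySem.Str.len line + 1 > maxChars then kept
    else pvKeptLoop maxChars rest (charCount + PySem.Str.len line + 1) (kept ++ [line])

-- _flush_section
def pvFlushSection (header : String) (sectionLines : List String) (maxChars : Int) : List String × Bool :=
  if header = "" then (sectionLines, false)
  else
    let sectionContent := PySem.Str.join "\n" sectionLines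
    if PySem.Str.len sectionContent ≤ maxChars then
      (header :: sectionLines, false)
    else
      let kept := pvKeptLoop maxChars sectionLines 0 [header]
      (kept ++ ["\n[... section truncated for length ...]"], true)

-- the body of A's main loop; state = (output_lines, current_section_lines, current_section_header, was_truncated)
def pvStepA (maxChars : Int) (st : List String × List String × String × Bool) (line : String) :
    List String × List String × String × Bool :=
  if PySem.Str.startswith line "# " then
    let fl := pvFlushSection st.2.2.1 st.2.1 maxChars
    (st.1 ++ fl.1, [], line, st.2.2.2 || fl.2)
  else
    (st.1, st.2.1 ++ [line], st.2.2.1, st.2.2.2)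

def truncate_session_notes_for_compact (content : String) : String × Bool :=
  -- content.split("\n"): the separator is the nonempty literal "\n", so split? is always some
  let lines := (PySem.Str.split? content "\n").getD []
  let maxChars : Int := 2000 * 4
  let st := lines.foldl (pvStepA maxChars) ([], [], "", false)
  let fl := pvFlushSection st.2.2.1 st.2.1 maxChars
  (PySem.Str.join "\n" (st.1 ++ fl.1), st.2.2.2 || fl.2)

-- ===== PORT B =====
-- the walrus comprehension `[acc := acc + len(ln) + 1 for ln in body]`: a scan whose
-- state is (list built so far, running total)
def pvPrefStep (p : List Int × Int) (ln : String) : List Int × Int :=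
  let acc := p.2 + PySem.Str.len ln + 1
  (p.1 ++ [acc], acc)

-- the `while lo < hi` binary-search loop (prefs[mid] is always in range there: mid < hi ≤ len(prefs))
def pvBsearch (prefs : List Int) (maxChars : Int) (lo hi : Nat) : Nat :=
  if lo < hi then
    let mid := (lo + hi) / 2
    if (PySem.List.pyGet? prefs (mid : Int)).getD 0 ≤ maxChars then
      pvBsearch prefs maxChars (mid + 1) hi
    else
      pvBsearch prefs maxChars lo mid
  else lo
termination_by hi - lo
decreasing_by all_goals omega

-- the body of B's loop over zip(cuts, cuts[1:]); state = (out, truncated_at)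
def pvStepBNew (lines : List String) (maxChars : Int) (st : List String × List Int)
    (pr : Int × Int) : List String × List Int :=
  let body := PySem.List.slice lines (some (pr.1 + 1)) (some pr.2)
  let prefs := (body.foldl pvPrefStep ([], 0)).1
  if (match prefs.getLast? with | some t => t | none => 0) - 1 ≤ maxChars then
    -- `(prefs[-1] if prefs else 0)`: prefs[-1] on a nonempty list is its last element
    (st.1 ++ PySem.List.slice lines (some pr.1) (some pr.2), st.2)
  else
    let lo := pvBsearch prefs maxChars 0 prefs.length
    -- lines[s] is always in range: s is a header index produced by enumerate
    (st.1 ++ ((PySem.List.pyGet? lines pr.1).getD "" ::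
        PySem.List.slice body none (some (lo : Int)) ++
        ["\n[... section truncated for length ...]"]),
     st.2 ++ [pr.1])

def truncate_session_notes_for_compact_alt (content : String) : String × Bool :=
  let maxChars : Int := 2000 * 4
  -- content.split("\n"): the separator is the nonempty literal "\n", so split? is always some
  let lines := (PySem.Str.split? content "\n").getD []
  let cuts : List Int :=
    (((PySem.List.enumerate lines).filter (fun p => PySem.Str.startswith p.2 "# ")).map (·.1))
      ++ [(lines.length : Int)]
  -- cuts[0]: cuts is never empty (lines.length is always appended)
  let out0 := PySem.List.slice lines none (some (cuts.headD 0))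
  let st := (cuts.zip cuts.tail).foldl (pvStepBNew lines maxChars) (out0, [])
  (PySem.Str.join "\n" st.1, !st.2.isEmpty)

-- ===== PRECONDITION & SPEC =====
def Spec_truncate_session_notes_for_compact (content : String) (out : String × Bool) : Prop := out = truncate_session_notes_for_compact_alt content
instance (content : String) (out : String × Bool) : Decidable (Spec_truncate_session_notes_for_compact content out) := by unfold Spec_truncate_session_notes_for_compact; infer_instance

-- ===== CLAIM (what is proved, stated in full; the proofs are below) =====
def Claim_equal_truncate_session_notes_for_compact : Prop := ∀ (content : String), Dom_truncate_session_notes_for_compact content → Spec_truncate_session_notes_for_compact content (truncate_session_notes_for_compact content)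

-- ===== LEMMAS AND PROOFS =====

-- ---- the common intermediate: the (preamble, sections) decomposition of the lines ----

def pvHdr (l : String) : Bool := PySem.Str.startswith l "# "

def pvAppendLast (line : String) : List (String × List String) → List (String × List String)
  | [] => []
  | (h, b) :: rest =>
    if rest.isEmpty then (h, b ++ [line]) :: rest else (h, b) :: pvAppendLast line rest

def pvStepB (st : List String × List (String × List String)) (line : String) :
    List String × List (String × List String) :=
  if pvHdr line then (st.1, st.2 ++ [(line, [])])
  else if st.2 ≠ [] then (st.1, pvAppendLast line st.2)
  else (st.1 ++ [line], st.2)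

def pvSplitSections (lines : List String) : List String × List (String × List String) :=
  lines.foldl pvStepB ([], [])

-- canonical render of one headed section (the break-free form of A's _flush_section)
def pvStepKeep (maxChars : Int) (st : List String × Int) (line : String) : List String × Int :=
  let total := st.2 + PySem.Str.len line + 1
  (if total ≤ maxChars then st.1 ++ [line] else st.1, total)

def pvRenderSection (header : String) (body : List String) (maxChars : Int) : List String × Bool :=
  if PySem.Str.len (PySem.Str.join "\n" body) ≤ maxChars then
    (header :: body, false)
  else
    let kept := (body.foldl (pvStepKeep maxChars) ([header], 0)).1
    (kept ++ ["\n[... section truncated for length ...]"], true)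

-- A's loop state as a function of the sections decomposition
def pvStA (maxChars : Int) (pre : List String) (secs : List (String × List String)) :
    List String × List String × String × Bool :=
  match secs.getLast? with
  | none => ([], pre, "", false)
  | some lb =>
    (pre ++ (secs.dropLast.map fun s => (pvRenderSection s.1 s.2 maxChars).1).flatten, lb.2, lb.1,
     secs.dropLast.foldl (fun acc s => acc || (pvRenderSection s.1 s.2 maxChars).2) false)

theorem pvStA_nil (maxChars : Int) (pre : List String) : pvStA maxChars pre [] = ([], pre, "", false) := rfl

theorem pvStA_concat (maxChars : Int) (pre : List String) (done : List (String × List String))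
    (lb : String × List String) :
    pvStA maxChars pre (done ++ [lb]) =
      (pre ++ (done.map fun s => (pvRenderSection s.1 s.2 maxChars).1).flatten, lb.2, lb.1,
       done.foldl (fun acc s => acc || (pvRenderSection s.1 s.2 maxChars).2) false) := by
  simp [pvStA]

theorem pvLen_nonneg (s : String) : 0 ≤ PySem.Str.len s := by
  simp [PySem.Str.len_eq]

-- once the running total overflows, the break-free fold never appends again
theorem pvKeep_stuck (maxChars : Int) (ls : List String) (kept : List String) (cc : Int)
    (h : maxChars < cc) : (ls.foldl (pvStepKeep maxChars) (kept, cc)).1 = kept := by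
  induction ls generalizing cc with
  | nil => rfl
  | cons l rest ih =>
    have hl := pvLen_nonneg l
    have hno : ¬ (cc + PySem.Str.len l + 1 ≤ maxChars) := by omega
    simp only [List.foldl_cons, pvStepKeep, if_neg hno]
    exact ih _ (by omega)

-- A's break-loop equals the break-free fold
theorem pvKeptLoop_eq (maxChars : Int) (ls : List String) (cc : Int) (kept : List String) :
    pvKeptLoop maxChars ls cc kept = (ls.foldl (pvStepKeep maxChars) (kept, cc)).1 := by
  induction ls generalizing cc kept with
  | nil => rfl
  | cons l rest ih =>
    by_cases h : cc + PySem.Str.len l + 1 > maxChars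
    · simp only [pvKeptLoop, if_pos h, List.foldl_cons, pvStepKeep]
      rw [if_neg (by omega)]
      exact (pvKeep_stuck maxChars rest kept _ (by omega)).symm
    · simp only [pvKeptLoop, if_neg h, List.foldl_cons, pvStepKeep]
      rw [if_pos (by omega)]
      exact ih _ _

theorem pvStartswith_ne_empty (h : String) (hs : pvHdr h = true) : h ≠ "" := by
  intro he
  rw [he] at hs
  exact absurd hs (by decide)

-- flushing a headed section is rendering it
theorem pvFlush_eq_render (h : String) (b : List String) (maxChars : Int)
    (hs : pvHdr h = true) :
    pvFlushSection h b maxChars = pvRenderSection h b maxChars := by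
  have hne := pvStartswith_ne_empty h hs
  simp only [pvFlushSection, pvRenderSection, if_neg hne]
  split_ifs with hlen
  · rfl
  · rw [pvKeptLoop_eq]

-- Python's sections[-1][1].append(line) on a nonempty list
theorem pvAppendLast_concat (line : String) (done : List (String × List String))
    (lb : String × List String) :
    pvAppendLast line (done ++ [lb]) = done ++ [(lb.1, lb.2 ++ [line])] := by
  induction done with
  | nil => simp [pvAppendLast]
  | cons d ds ih =>
    obtain ⟨h, b⟩ := d
    have hne : (ds ++ [lb]).isEmpty = false := by simp
    simp [pvAppendLast, hne, ih]

theorem pvSplitSections_concat (lines : List String) (l : String) :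
    pvSplitSections (lines ++ [l]) = pvStepB (pvSplitSections lines) l := by
  simp [pvSplitSections, List.foldl_append]

-- the coupled invariant: A's loop state is determined by the sections decomposition,
-- and every collected header starts with "# "
theorem pvInvariant (maxChars : Int) (lines : List String) :
    lines.foldl (pvStepA maxChars) ([], [], "", false) =
      pvStA maxChars (pvSplitSections lines).1 (pvSplitSections lines).2 ∧
    ∀ s ∈ (pvSplitSections lines).2, pvHdr s.1 = true := by
  induction lines using List.reverseRecOn with
  | nil => exact ⟨rfl, by simp [pvSplitSections]⟩
  | append_singleton ls l ih =>
    obtain ⟨hst, hhd⟩ := ih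
    rw [List.foldl_append, List.foldl_cons, List.foldl_nil, hst, pvSplitSections_concat]
    rcases List.eq_nil_or_concat ((pvSplitSections ls).2) with hsecs | ⟨done, lb, hsecs⟩
    · by_cases hb : pvHdr l = true
      · have hbC : PySem.Chars.startswith l.toList ['#', ' '] = true := by
          simpa [pvHdr] using hb
        refine ⟨?_, ?_⟩
        · simp [pvStepA, pvStepB, pvHdr, hsecs, hbC, pvStA, pvFlushSection]
        · intro s hs
          simp [pvStepB, pvHdr, hsecs, hbC] at hs
          rw [hs]
          exact hb
      · have hbC : PySem.Chars.startswith l.toList ['#', ' '] = false := by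
          simpa [pvHdr] using hb
        refine ⟨?_, ?_⟩
        · simp [pvStepA, pvStepB, pvHdr, hsecs, hbC, pvStA]
        · intro s hs
          simp [pvStepB, pvHdr, hsecs, hbC] at hs
    · have hlb : pvHdr lb.1 = true := hhd lb (by rw [hsecs]; simp)
      by_cases hb : pvHdr l = true
      · have hbC : PySem.Chars.startswith l.toList ['#', ' '] = true := by
          simpa [pvHdr] using hb
        refine ⟨?_, ?_⟩
        · simp [pvStepA, pvStepB, pvHdr, hsecs, hbC, pvStA_concat, pvFlush_eq_render _ _ _ hlb,
            List.append_assoc]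
          rw [show done ++ [lb, (l, ([] : List String))] = (done ++ [lb]) ++ [(l, [])] by simp]
          rw [pvStA_concat]
          simp [List.foldl_append]
        · intro s hs
          simp [pvStepB, pvHdr, hsecs, hbC] at hs
          rcases hs with h1 | h2 | h3
          · exact hhd s (by rw [hsecs]; simp [h1])
          · rw [h2]; exact hlb
          · rw [h3]; exact hb
      · have hbC : PySem.Chars.startswith l.toList ['#', ' '] = false := by
          simpa [pvHdr] using hb
        refine ⟨?_, ?_⟩
        · simp [pvStepA, pvStepB, pvHdr, hsecs, hbC, pvAppendLast_concat, pvStA_concat]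
        · intro s hs
          simp [pvStepB, pvHdr, hsecs, hbC, pvAppendLast_concat] at hs
          rcases hs with h1 | h2
          · exact hhd s (by rw [hsecs]; simp [h1])
          · rw [h2]; exact hlb

-- shape of the decomposition: it reconstructs the lines, the preamble is headerless,
-- and every body is headerless
theorem pvSplit_shape (lines : List String) :
    lines = (pvSplitSections lines).1 ++
        ((pvSplitSections lines).2.map fun s => s.1 :: s.2).flatten ∧
    (∀ l ∈ (pvSplitSections lines).1, pvHdr l = false) ∧
    ∀ s ∈ (pvSplitSections lines).2, ∀ l ∈ s.2, pvHdr l = false := by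
  induction lines using List.reverseRecOn with
  | nil => exact ⟨rfl, by simp [pvSplitSections], by simp [pvSplitSections]⟩
  | append_singleton ls l ih =>
    obtain ⟨hrec, hpre, hbody⟩ := ih
    rw [pvSplitSections_concat]
    by_cases hb : pvHdr l = true
    · refine ⟨?_, ?_, ?_⟩
      · simp only [pvStepB, if_pos hb]
        conv_lhs => rw [hrec]
        simp
      · intro x hx
        simp only [pvStepB, if_pos hb] at hx
        exact hpre x hx
      · intro s hs
        simp only [pvStepB, if_pos hb, List.mem_append, List.mem_singleton] at hs
        rcases hs with h | h
        · exact hbody s h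
        · rw [h]; simp
    · rcases List.eq_nil_or_concat ((pvSplitSections ls).2) with hsecs | ⟨done, lb, hsecs⟩
      · refine ⟨?_, ?_, ?_⟩
        · simp only [pvStepB, if_neg hb, hsecs, ne_eq, not_true_eq_false, if_false]
          conv_lhs => rw [hrec]
          simp [hsecs]
        · intro x hx
          simp only [pvStepB, if_neg hb, hsecs, ne_eq, not_true_eq_false, if_false] at hx
          simp only [List.mem_append, List.mem_singleton] at hx
          rcases hx with h | h
          · exact hpre x h
          · rw [h]; simpa using hb
        · intro s hs
          simp only [pvStepB, if_neg hb, hsecs, ne_eq, not_true_eq_false, if_false] at hs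
          simp at hs
      · rw [List.concat_eq_append] at hsecs
        have hne : (pvSplitSections ls).2 ≠ [] := by rw [hsecs]; simp
        refine ⟨?_, ?_, ?_⟩
        · simp only [pvStepB, if_neg hb, if_pos hne, hsecs, pvAppendLast_concat]
          conv_lhs => rw [hrec]
          simp [hsecs]
        · intro x hx
          simp only [pvStepB, if_neg hb, if_pos hne] at hx
          exact hpre x hx
        · intro s hs
          simp only [pvStepB, if_neg hb, hsecs] at hs
          rw [if_pos (show done ++ [lb] ≠ [] by simp)] at hs
          simp only [pvAppendLast_concat, List.mem_append, List.mem_singleton] at hs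
          rcases hs with h | h
          · exact hbody s (by rw [hsecs]; simp [h])
          · rw [h]
            intro x hx
            simp only [List.mem_append, List.mem_singleton] at hx
            rcases hx with h2 | h2
            · exact hbody lb (by rw [hsecs]; simp) x h2
            · rw [h2]; simpa using hb


-- ---- linking B's index/slice computation to the decomposition ----

-- the cut positions determined by the decomposition: each section start, then the total length
def pvCutsFrom (δ : Int) : List (String × List String) → List Int
  | [] => [δ]
  | (_, b) :: rest => δ :: pvCutsFrom (δ + 1 + b.length) rest

-- header positions as B computes them, with an arbitrary enumerate start
def pvF (ls : List String) (s : Int) : List Int :=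
  ((PySem.List.enumerate ls s).filter (fun p => PySem.Str.startswith p.2 "# ")).map (·.1)

theorem pvF_cons (x : String) (xs : List String) (s : Int) :
    pvF (x :: xs) s = (if pvHdr x then [s] else []) ++ pvF xs (s + 1) := by
  by_cases h : pvHdr x = true
  · have h' : PySem.Chars.startswith x.toList ['#', ' '] = true := by simpa [pvHdr] using h
    simp [pvF, PySem.List.enumerate, List.filter_cons, h, h']
  · have h' : PySem.Chars.startswith x.toList ['#', ' '] = false := by
      simpa [pvHdr] using h
    simp [pvF, PySem.List.enumerate, List.filter_cons, h, h']

theorem pvF_append (xs ys : List String) (s : Int) :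
    pvF (xs ++ ys) s = pvF xs s ++ pvF ys (s + xs.length) := by
  induction xs generalizing s with
  | nil => simp [pvF]
  | cons x xs ih =>
    have harg : s + 1 + (xs.length : Int) = s + ((xs.length : Int) + 1) := by ring
    simp only [List.cons_append, pvF_cons, ih, List.append_assoc, List.length_cons]
    push_cast
    rw [harg]

theorem pvF_headerless (xs : List String) (s : Int) (h : ∀ l ∈ xs, pvHdr l = false) :
    pvF xs s = [] := by
  induction xs generalizing s with
  | nil => rfl
  | cons x xs ih =>
    rw [pvF_cons, h x (by simp), ih _ (fun l hl => h l (by simp [hl]))]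
    rfl

theorem pvCuts_eq (secs : List (String × List String)) (δ : Int)
    (hh : ∀ s ∈ secs, pvHdr s.1 = true)
    (hb : ∀ s ∈ secs, ∀ l ∈ s.2, pvHdr l = false) :
    pvF ((secs.map fun s => s.1 :: s.2).flatten) δ ++
        [δ + (((secs.map fun s => s.1 :: s.2).flatten).length : Int)] = pvCutsFrom δ secs := by
  induction secs generalizing δ with
  | nil => simp [pvF, pvCutsFrom]
  | cons s rest ih =>
    obtain ⟨h, b⟩ := s
    have hhd : pvHdr h = true := hh (h, b) (by simp)
    have hbody : ∀ l ∈ b, pvHdr l = false := hb (h, b) (by simp)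
    simp only [List.map_cons, List.flatten_cons, pvCutsFrom]
    rw [show (h :: b) ++ (rest.map fun s => s.1 :: s.2).flatten
        = h :: (b ++ (rest.map fun s => s.1 :: s.2).flatten) from rfl]
    rw [pvF_cons, if_pos hhd, pvF_append, pvF_headerless b _ hbody]
    have ihr := ih (δ + 1 + (b.length : Int)) (fun s hs => hh s (by simp [hs]))
      (fun s hs => hb s (by simp [hs]))
    simp only [List.nil_append, List.singleton_append, List.cons_append, List.length_cons,
      List.length_append]
    rw [← ihr]
    push_cast
    ring_nf

-- ---- the prefix-sum scan and its properties ----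

def pvPrefixes (c : Int) : List String → List Int
  | [] => []
  | ln :: r => (c + PySem.Str.len ln + 1) :: pvPrefixes (c + PySem.Str.len ln + 1) r

def pvTot (b : List String) : Int := (b.map (fun l => PySem.Str.len l + 1)).sum

theorem pvScan_eq (b : List String) (acc : List Int) (c : Int) :
    b.foldl pvPrefStep (acc, c) = (acc ++ pvPrefixes c b, (pvPrefixes c b).getLastD c) := by
  induction b generalizing acc c with
  | nil => simp [pvPrefixes]
  | cons ln r ih =>
    simp only [List.foldl_cons, pvPrefStep, pvPrefixes, ih, List.append_assoc,
      List.singleton_append]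
    congr 1
    rw [List.getLastD_cons]

theorem pvPrefixes_lb (b : List String) (c : Int) : ∀ t ∈ pvPrefixes c b, c + 1 ≤ t := by
  induction b generalizing c with
  | nil => simp [pvPrefixes]
  | cons ln r ih =>
    intro t ht
    have hl := pvLen_nonneg ln
    simp only [pvPrefixes, List.mem_cons] at ht
    rcases ht with h | h
    · omega
    · have := ih _ t h
      omega

theorem pvPrefixes_sorted (b : List String) (c : Int) :
    (pvPrefixes c b).Pairwise (· ≤ ·) := by
  induction b generalizing c with
  | nil => simp [pvPrefixes]
  | cons ln r ih =>
    simp only [pvPrefixes, List.pairwise_cons]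
    exact ⟨fun t ht => by have := pvPrefixes_lb r _ t ht; omega, ih _⟩

theorem pvPrefixes_last (b : List String) (c : Int) :
    (pvPrefixes c b).getLastD c = c + pvTot b := by
  induction b generalizing c with
  | nil => simp [pvPrefixes, pvTot]
  | cons ln r ih =>
    simp only [pvPrefixes, List.getLastD_cons, ih, pvTot, List.map_cons, List.sum_cons]
    ring

-- len("\n".join(body)) is the total of the line sizes minus one (nonempty body)
theorem pvJoinLen (xs : List String) (x : String) :
    PySem.Str.len (PySem.Str.join "\n" (x :: xs)) = pvTot (x :: xs) - 1 := by
  induction xs generalizing x with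
  | nil =>
    simp [PySem.Str.len_eq, PySem.Str.toList_join, PySem.Chars.join_singleton, pvTot]
  | cons y r ih =>
    have h := ih y
    simp only [pvTot, List.map_cons, List.sum_cons, PySem.Str.len_eq,
      PySem.Str.toList_join] at h ⊢
    rw [PySem.Chars.join_cons_cons]
    simp only [List.length_append]
    push_cast at h ⊢
    simp only [List.length_cons, List.length_nil]
    push_cast
    omega

-- the break-free fold keeps exactly the lines whose prefix sum fits
theorem pvKeep_take (maxChars : Int) (b : List String) (acc : List String) (c : Int) :
    (b.foldl (pvStepKeep maxChars) (acc, c)).1 =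
      acc ++ b.take ((pvPrefixes c b).countP (fun t => decide (t ≤ maxChars))) := by
  induction b generalizing acc c with
  | nil => simp [pvPrefixes]
  | cons ln r ih =>
    by_cases hfit : c + PySem.Str.len ln + 1 ≤ maxChars
    · simp only [List.foldl_cons, pvStepKeep, if_pos hfit, pvPrefixes, List.countP_cons,
        decide_eq_true_eq, if_pos hfit, ih]
      simp [hfit, List.take_succ_cons]
    · have hstuck := pvKeep_stuck maxChars r acc (c + PySem.Str.len ln + 1) (by omega)
      simp only [List.foldl_cons, pvStepKeep, if_neg hfit, hstuck, pvPrefixes,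
        List.countP_cons]
      have h0 : (pvPrefixes (c + PySem.Str.len ln + 1) r).countP
          (fun t => decide (t ≤ maxChars)) = 0 := by
        rw [List.countP_eq_zero]
        intro t ht
        have := pvPrefixes_lb _ _ t ht
        simp only [decide_eq_true_eq]
        omega
      simp only [PySem.Str.len_eq, PySem.Chars.len_eq, String.length_toList] at hfit
      simp [hfit, h0]
      intro a ha
      have h1 := pvPrefixes_lb _ _ a ha
      simp only [PySem.Str.len_eq, PySem.Chars.len_eq, String.length_toList] at h1
      omega

-- the binary search returns the number of fitting prefix sums
theorem pvCount_of_boundary (l : List Int) (mx : Int) (k : Nat) (hk : k ≤ l.length)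
    (h1 : ∀ i (h : i < l.length), i < k → l[i] ≤ mx)
    (h2 : ∀ i (h : i < l.length), k ≤ i → mx < l[i]) :
    l.countP (fun t => decide (t ≤ mx)) = k := by
  induction l generalizing k with
  | nil =>
    simp only [List.countP_nil, List.length_nil] at *
    omega
  | cons a t ih =>
    cases k with
    | zero =>
      have ha := h2 0 (by simp) (by omega)
      simp only [List.getElem_cons_zero] at ha
      simp only [List.countP_cons, decide_eq_true_eq, if_neg (by omega : ¬ a ≤ mx)]
      rw [ih 0 (by omega) (by omega)]
      intro i h _
      have := h2 (i + 1) (by simpa using Nat.succ_lt_succ h) (by omega)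
      simpa using this
    | succ k =>
      have ha := h1 0 (by simp) (by omega)
      simp only [List.getElem_cons_zero] at ha
      simp only [List.countP_cons, decide_eq_true_eq, if_pos ha]
      rw [ih k (by simpa using hk)]
      · intro i h hi
        have := h1 (i + 1) (by simpa using Nat.succ_lt_succ h) (by omega)
        simpa using this
      · intro i h hi
        have := h2 (i + 1) (by simpa using Nat.succ_lt_succ h) (by omega)
        simpa using this

theorem pvBsearch_inv (prefs : List Int) (mx : Int)
    (hs : ∀ i j (hij : i ≤ j) (hj : j < prefs.length), prefs[i]'(by omega) ≤ prefs[j]) :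
    ∀ n lo hi, hi - lo ≤ n → lo ≤ hi → hi ≤ prefs.length →
      (∀ i (h : i < prefs.length), i < lo → prefs[i] ≤ mx) →
      (∀ i (h : i < prefs.length), hi ≤ i → mx < prefs[i]) →
      pvBsearch prefs mx lo hi ≤ prefs.length ∧
      (∀ i (h : i < prefs.length), i < pvBsearch prefs mx lo hi → prefs[i] ≤ mx) ∧
      (∀ i (h : i < prefs.length), pvBsearch prefs mx lo hi ≤ i → mx < prefs[i]) := by
  intro n
  induction n with
  | zero =>
    intro lo hi hn hlh hhl hL hR
    have : lo = hi := by omega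
    rw [pvBsearch, if_neg (by omega)]
    exact ⟨by omega, fun i h hi => hL i h (by omega), fun i h hi => hR i h (by omega)⟩
  | succ n ih =>
    intro lo hi hn hlh hhl hL hR
    by_cases hlt : lo < hi
    · have hmid : (lo + hi) / 2 < prefs.length := by omega
      have hget : (PySem.List.pyGet? prefs (((lo + hi) / 2 : Nat) : Int)).getD 0 =
          prefs[(lo + hi) / 2] := by
        rw [PySem.List.pyGet?_natCast]
        simp [List.getElem?_eq_getElem hmid]
      rw [pvBsearch, if_pos hlt]
      simp only [hget]
      by_cases hc : prefs[(lo + hi) / 2] ≤ mx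
      · rw [if_pos hc]
        exact ih ((lo + hi) / 2 + 1) hi (by omega) (by omega) hhl
          (fun i h hi2 => by
            by_cases hilo : i < lo
            · exact hL i h hilo
            · exact le_trans (hs i ((lo + hi) / 2) (by omega) hmid) hc)
          hR
      · rw [if_neg hc]
        exact ih lo ((lo + hi) / 2) (by omega) (by omega) (by omega) hL
          (fun i h hi2 => lt_of_not_ge fun hle =>
            hc (le_trans (hs ((lo + hi) / 2) i hi2 h) hle))
    · rw [pvBsearch, if_neg hlt]
      exact ⟨by omega, fun i h hi => hL i h (by omega), fun i h hi => hR i h (by omega)⟩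

theorem pvBsearch_eq_countP (prefs : List Int) (mx : Int)
    (hs : prefs.Pairwise (· ≤ ·)) :
    pvBsearch prefs mx 0 prefs.length = prefs.countP (fun t => decide (t ≤ mx)) := by
  have hmono : ∀ i j (hij : i ≤ j) (hj : j < prefs.length), prefs[i]'(by omega) ≤ prefs[j] := by
    intro i j hij hj
    rcases Nat.lt_or_ge i j with h | h
    · exact (List.pairwise_iff_getElem.mp hs) i j (by omega) hj h
    · have : i = j := by omega
      subst this
      exact le_refl _
  obtain ⟨h1, h2, h3⟩ := pvBsearch_inv prefs mx hmono prefs.length 0 prefs.length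
    (by omega) (by omega) (by omega) (fun i h hi => by omega) (fun i h hi => by omega)
  exact (pvCount_of_boundary prefs mx _ h1 h2 h3).symm

-- ---- B's fold over the zip of cuts produces the rendered sections ----

theorem pvCutsFrom_head (δ : Int) (secs : List (String × List String)) :
    (pvCutsFrom δ secs).headD 0 = δ := by
  cases secs with
  | nil => rfl
  | cons s rest => cases s; rfl

def pvTrAt (maxChars : Int) (δ : Int) : List (String × List String) → List Int
  | [] => []
  | (h, b) :: rest =>
    (if (pvRenderSection h b maxChars).2 then [δ] else []) ++ pvTrAt maxChars (δ + 1 + b.length) rest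

theorem pvTrAt_isEmpty (maxChars δ : Int) (secs : List (String × List String)) :
    (pvTrAt maxChars δ secs).isEmpty = !(secs.any fun s => (pvRenderSection s.1 s.2 maxChars).2) := by
  induction secs generalizing δ with
  | nil => rfl
  | cons s rest ih =>
    obtain ⟨h, b⟩ := s
    by_cases hf : (pvRenderSection h b maxChars).2 = true
    · simp [pvTrAt, hf]
    · simp only [Bool.not_eq_true] at hf
      simp [pvTrAt, hf, ih]

theorem pvFoldOr (secs : List (String × List String)) (maxChars : Int) (c : Bool) :
    secs.foldl (fun acc s => acc || (pvRenderSection s.1 s.2 maxChars).2) c =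
      (c || secs.any fun s => (pvRenderSection s.1 s.2 maxChars).2) := by
  induction secs generalizing c with
  | nil => simp
  | cons s rest ih => simp [ih, Bool.or_assoc]

theorem pvGetLastD_ne_nil (l : List Int) (d d' : Int) (h : l ≠ []) :
    l.getLastD d = l.getLastD d' := by
  cases l using List.reverseRecOn with
  | nil => exact absurd rfl h
  | append_singleton t a => simp

theorem pvPrefixes_ne_nil (ln : String) (r : List String) (c : Int) :
    pvPrefixes c (ln :: r) ≠ [] := by
  simp [pvPrefixes]

-- one step of B's loop on the index pair of one section is the render of that section
theorem pvStepBNew_sec (maxChars : Int) (hm : 0 ≤ maxChars) (pre : List String) (h : String)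
    (b flatrest : List String) (st : List String × List Int) :
    pvStepBNew (pre ++ h :: (b ++ flatrest)) maxChars st
        ((pre.length : Int), (pre.length : Int) + 1 + (b.length : Int)) =
      (st.1 ++ (pvRenderSection h b maxChars).1,
       st.2 ++ if (pvRenderSection h b maxChars).2 then [(pre.length : Int)] else []) := by
  have e1 : (pre.length : Int) + 1 = ((pre.length + 1 : Nat) : Int) := by push_cast; ring
  have e2 : (pre.length : Int) + 1 + (b.length : Int) =
      ((pre.length + 1 + b.length : Nat) : Int) := by push_cast; ring
  have hsplit : pre ++ h :: (b ++ flatrest) = (pre ++ [h]) ++ (b ++ flatrest) := by simp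
  have hbody : PySem.List.slice (pre ++ h :: (b ++ flatrest))
      (some ((pre.length : Int) + 1)) (some ((pre.length : Int) + 1 + (b.length : Int))) = b := by
    rw [e2, e1, PySem.List.slice_natCast, hsplit,
      List.drop_left' (by simp : (pre ++ [h]).length = pre.length + 1)]
    rw [show pre.length + 1 + b.length - (pre.length + 1) = b.length by omega]
    exact List.take_left' rfl
  have hhb : PySem.List.slice (pre ++ h :: (b ++ flatrest))
      (some (pre.length : Int)) (some ((pre.length : Int) + 1 + (b.length : Int))) = h :: b := by
    rw [e2, show ((pre.length : Nat) : Int) = ((pre.length : Nat) : Int) from rfl,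
      PySem.List.slice_natCast, List.drop_left' (rfl : pre.length = pre.length)]
    rw [show pre.length + 1 + b.length - pre.length = b.length + 1 by omega]
    simp [List.take_left']
  have hget : (PySem.List.pyGet? (pre ++ h :: (b ++ flatrest)) (pre.length : Int)).getD "" = h := by
    rw [PySem.List.pyGet?_natCast]
    rw [List.getElem?_append_right (le_refl pre.length)]
    simp
  simp only [pvStepBNew, hbody, hget]
  rw [pvScan_eq]
  simp only [List.nil_append]
  cases b with
  | nil =>
    have hcond : ((match (pvPrefixes 0 ([] : List String)).getLast? with
        | some t => t | none => 0) : Int) - 1 ≤ maxChars := by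
      simp [pvPrefixes]
      omega
    have hrcond : PySem.Str.len (PySem.Str.join "\n" ([] : List String)) ≤ maxChars := by
      have : PySem.Str.len (PySem.Str.join "\n" ([] : List String)) = 0 := by decide
      omega
    rw [if_pos hcond]
    simp only [pvRenderSection, if_pos hrcond, hhb]
    simp
  | cons x xs =>
    have hlast : (match (pvPrefixes 0 (x :: xs)).getLast? with
        | some t => t | none => 0) = pvTot (x :: xs) := by
      have h1 : (pvPrefixes 0 (x :: xs)).getLastD 0 = pvTot (x :: xs) := by
        rw [pvGetLastD_ne_nil _ 0 ((0 : Int)) (pvPrefixes_ne_nil x xs 0)]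
        simpa using pvPrefixes_last (x :: xs) 0
      rw [← h1, List.getLastD_eq_getLast?]
      cases (pvPrefixes 0 (x :: xs)).getLast? <;> rfl
    have hjl := pvJoinLen xs x
    by_cases hfits : pvTot (x :: xs) - 1 ≤ maxChars
    · rw [if_pos (by rw [hlast]; exact hfits)]
      simp only [pvRenderSection, hjl, if_pos hfits, hhb]
      simp
    · rw [if_neg (by rw [hlast]; exact hfits)]
      simp only [pvRenderSection, hjl, if_neg hfits]
      rw [pvBsearch_eq_countP _ _ (pvPrefixes_sorted (x :: xs) 0),
        PySem.List.slice_to_natCast, pvKeep_take]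
      simp

theorem pvBFold (maxChars : Int) (hm : 0 ≤ maxChars) (secs : List (String × List String))
    (pre out0 : List String) (tr : List Int)
    (hh : ∀ s ∈ secs, pvHdr s.1 = true)
    (hb : ∀ s ∈ secs, ∀ l ∈ s.2, pvHdr l = false) :
    (((pvCutsFrom (pre.length : Int) secs).zip (pvCutsFrom (pre.length : Int) secs).tail).foldl
        (pvStepBNew (pre ++ (secs.map fun s => s.1 :: s.2).flatten) maxChars) (out0, tr)) =
      (out0 ++ (secs.map fun s => (pvRenderSection s.1 s.2 maxChars).1).flatten,
       tr ++ pvTrAt maxChars (pre.length : Int) secs) := by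
  induction secs generalizing pre out0 tr with
  | nil => simp [pvCutsFrom, pvTrAt]
  | cons sec rest ih =>
    obtain ⟨h, b⟩ := sec
    have hc2 : pvCutsFrom ((pre.length : Int) + 1 + (b.length : Int)) rest =
        ((pre.length : Int) + 1 + (b.length : Int)) ::
          (pvCutsFrom ((pre.length : Int) + 1 + (b.length : Int)) rest).tail := by
      cases rest with
      | nil => rfl
      | cons s r => cases s; rfl
    have hcuts : pvCutsFrom (pre.length : Int) ((h, b) :: rest) =
        (pre.length : Int) :: pvCutsFrom ((pre.length : Int) + 1 + (b.length : Int)) rest := rfl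
    rw [hcuts]
    conv_lhs => rw [hc2]
    simp only [List.tail_cons, List.zip_cons_cons, List.foldl_cons]
    rw [← hc2]
    have hflat : pre ++ (((h, b) :: rest).map fun s => s.1 :: s.2).flatten =
        pre ++ h :: (b ++ (rest.map fun s => s.1 :: s.2).flatten) := by simp
    rw [hflat, pvStepBNew_sec maxChars hm pre h b _ (out0, tr)]
    have hlines : pre ++ h :: (b ++ (rest.map fun s => s.1 :: s.2).flatten) =
        (pre ++ h :: b) ++ (rest.map fun s => s.1 :: s.2).flatten := by simp
    have hlen : (pre.length : Int) + 1 + (b.length : Int) = (((pre ++ h :: b).length : Nat) : Int) := by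
      simp
      push_cast
      ring
    rw [hlines, hlen]
    rw [ih (pre ++ h :: b) _ _ (fun s hs => hh s (by simp [hs]))
      (fun s hs => hb s (by simp [hs]))]
    have htr : pvTrAt maxChars (pre.length : Int) ((h, b) :: rest) =
        (if (pvRenderSection h b maxChars).2 then [(pre.length : Int)] else []) ++
          pvTrAt maxChars ((pre.length : Int) + 1 + (b.length : Int)) rest := rfl
    rw [htr, hlen]
    simp [pvTrAt]

-- ===== VERDICT (by name: the statement is the Claim_ definition above) =====
theorem truncate_session_notes_for_compact_spec : Claim_equal_truncate_session_notes_for_compact := by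
  intro content _
  unfold Spec_truncate_session_notes_for_compact
  simp only [truncate_session_notes_for_compact, truncate_session_notes_for_compact_alt]
  obtain ⟨hst, hhd⟩ := pvInvariant (2000 * 4) ((PySem.Str.split? content "\n").getD [])
  obtain ⟨hrec, hpre, hbody⟩ := pvSplit_shape ((PySem.Str.split? content "\n").getD [])
  rw [hst]
  set lines := (PySem.Str.split? content "\n").getD [] with hldef
  set pre := (pvSplitSections lines).1 with hpredef
  set secs := (pvSplitSections lines).2 with hsecsdef
  have hcuts : (((PySem.List.enumerate lines).filter
        (fun p => PySem.Str.startswith p.2 "# ")).map (·.1)) ++ [(lines.length : Int)] =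
      pvCutsFrom (pre.length : Int) secs := by
    have h1 : ((PySem.List.enumerate lines).filter
        (fun p => PySem.Str.startswith p.2 "# ")).map (·.1) = pvF lines 0 := rfl
    rw [h1]
    conv_lhs => rw [hrec]
    rw [pvF_append, pvF_headerless pre 0 hpre, List.length_append, List.nil_append]
    rw [show (0 : Int) + (pre.length : Int) = (pre.length : Int) by ring]
    rw [show (((pre.length + (secs.map fun s => s.1 :: s.2).flatten.length : Nat)) : Int)
        = (pre.length : Int) + ((secs.map fun s => s.1 :: s.2).flatten.length : Int) by push_cast; ring]
    exact pvCuts_eq secs (pre.length : Int) hhd hbody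
  rw [hcuts]
  have hout0 : PySem.List.slice lines none (some ((pvCutsFrom (pre.length : Int) secs).headD 0)) =
      pre := by
    rw [pvCutsFrom_head, PySem.List.slice_to_natCast]
    conv_lhs => rw [hrec]
    exact List.take_left' rfl
  rw [hout0]
  have hlines2 : lines = pre ++ (secs.map fun s => s.1 :: s.2).flatten := hrec
  rw [hlines2, pvBFold (2000 * 4) (by norm_num) secs pre pre [] hhd hbody]
  rw [List.nil_append]
  -- both sides now mention only the decomposition; finish by cases on secs
  rcases List.eq_nil_or_concat secs with hsecs | ⟨done, lb, hsecs⟩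
  · rw [hsecs, pvStA_nil]
    simp [pvFlushSection, pvTrAt]
  · rw [List.concat_eq_append] at hsecs
    have hlb : pvHdr lb.1 = true := hhd lb (by rw [hsecs]; simp)
    rw [hsecs, pvStA_concat]
    simp only [pvFlush_eq_render _ _ _ hlb]
    refine Prod.ext ?_ ?_
    · show PySem.Str.join "\n" _ = PySem.Str.join "\n" _
      congr 1
      simp [List.append_assoc]
    · rw [pvFoldOr]
      have := pvTrAt_isEmpty (2000 * 4) (pre.length : Int) (done ++ [lb])
      rw [this]
      simp [List.any_append, Bool.or_comm]
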